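-- pv_equiv track=rewrite | github.com/ante-neh/Leetcodepractice | competetiveProgrammingContest/Piling Up!/solution.py | piling
-- ===== SOURCE A (Python) =====
-- def piling(blocks):
--     l, r = 0, len(blocks) - 1
--     while blocks:
--         large = None
--         if blocks[-1] > blocks[0]:
--             large = blocks.pop()
--
--         else:
--             large = blocks.pop(0)
--
--         if len(blocks) == 0:
--             return "Yes"
--
--         if blocks[-1] > large or blocks[0] > large:
--             return "No"
-- ===== SOURCE B (Python) =====
-- def piling(blocks):
--     # Single left-to-right pass: the blocks can be piled from both ends
--     # iff the sequence is non-increasing and then non-decreasing (a "valley").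
--     going_down = True
--     prev = None
--     for x in blocks:
--         if prev is not None:
--             if going_down:
--                 if x > prev:
--                     going_down = False
--             elif x < prev:
--                 return "No"
--         prev = x
--     return "Yes"
-- ===== Notes on version B (the rewrite author's own statement) =====
-- stated objective: faster
-- what changed: Replaced the destructive two-ended greedy (repeated pop(0)/pop() with end comparisons) by a single left-to-right pass that checks the list is non-increasing then non-decreasing (a 'valley'), which is equivalent.
-- outside the precondition, e.g. on piling([]): A returns None, B returns 'Yes'
import Mathlib
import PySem

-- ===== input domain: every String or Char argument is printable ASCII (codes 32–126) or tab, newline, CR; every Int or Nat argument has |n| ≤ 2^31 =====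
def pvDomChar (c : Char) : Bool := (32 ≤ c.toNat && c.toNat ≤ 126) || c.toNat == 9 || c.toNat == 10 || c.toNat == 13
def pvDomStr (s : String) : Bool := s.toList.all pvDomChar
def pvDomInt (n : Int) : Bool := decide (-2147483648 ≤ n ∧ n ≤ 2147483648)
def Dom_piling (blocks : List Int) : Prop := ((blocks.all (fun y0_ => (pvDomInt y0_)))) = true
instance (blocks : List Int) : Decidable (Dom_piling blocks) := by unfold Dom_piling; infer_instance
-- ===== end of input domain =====

-- B replaces A's destructive two-ended greedy (pop(0)/pop()) by one linear "valley" scan (non-increasing then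
-- non-decreasing); equivalence is about the return value only — A empties its argument list in place, B does not mutate.

-- ===== PORT A =====
-- A's while loop: each iteration pops the larger end, then returns "Yes" if empty,
-- "No" if a remaining end exceeds the popped value, else continues.
def pilingLoop : List Int → String
  | [] => ""            -- while loop exits: Python A falls off the end and returns None (excluded by Pre_)
  | x :: rest =>
    if (x :: rest).getLastD 0 > x then
      -- large = blocks.pop()
      if (x :: rest).dropLast = [] then "Yes"
      else if ((x :: rest).dropLast.getLastD 0 > (x :: rest).getLastD 0
              ∨ (x :: rest).dropLast.headD 0 > (x :: rest).getLastD 0) then "No"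
      else pilingLoop ((x :: rest).dropLast)
    else
      -- large = blocks.pop(0)
      if rest = [] then "Yes"
      else if (rest.getLastD 0 > x ∨ rest.headD 0 > x) then "No"
      else pilingLoop rest
termination_by xs => xs.length
decreasing_by
  · simp [List.length_dropLast]
  · simp

def piling (blocks : List Int) : String := pilingLoop blocks

-- ===== PORT B =====
-- B's for loop: state (going_down, prev); prev is None only before the first element.
def pilingAltLoop : Bool → Int → List Int → String
  | _, _, [] => "Yes"
  | goingDown, prev, x :: l =>
    if goingDown then
      if x > prev then pilingAltLoop false x l else pilingAltLoop true x l
    else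
      if x < prev then "No" else pilingAltLoop false x l

def piling_alt (blocks : List Int) : String :=
  match blocks with
  | [] => "Yes"
  | x :: l => pilingAltLoop true x l

-- ===== PRECONDITION & SPEC =====
-- Pre_ excludes only the empty list, on which Python A's while loop never runs and A returns None (not a string).
def Pre_piling (blocks : List Int) : Prop := blocks ≠ []
instance (blocks : List Int) : Decidable (Pre_piling blocks) := by unfold Pre_piling; infer_instance
def pvWitness_piling : List Int := [3, 1, 2]

def Spec_piling (blocks : List Int) (out : String) : Prop := out = piling_alt blocks
instance (blocks : List Int) (out : String) : Decidable (Spec_piling blocks out) := by unfold Spec_piling; infer_instance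

-- ===== CLAIM (what is proved, stated in full; the proofs are below) =====
def Claim_equal_piling : Prop := ∀ (blocks : List Int), Dom_piling blocks → Pre_piling blocks → Spec_piling blocks (piling blocks)

-- ===== LEMMAS AND PROOFS =====

-- Boolean versions of B's two scanning phases.
def pvUp : Int → List Int → Bool
  | _, [] => true
  | p, x :: l => if x < p then false else pvUp x l

def pvDown : Int → List Int → Bool
  | _, [] => true
  | p, x :: l => if x > p then pvUp x l else pvDown x l

theorem lastD_concat : ∀ (m : List Int) (d y : Int), (m ++ [y]).getLastD d = y
  | [], _, _ => rfl
  | a :: m, d, y => by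
    rw [List.cons_append, List.getLastD_cons]
    exact lastD_concat m a y

theorem lastD_irrel : ∀ (l : List Int) (a b : Int), l ≠ [] → l.getLastD a = l.getLastD b
  | [], _, _, h => absurd rfl h
  | x :: l, a, b, _ => by
    rw [List.getLastD_cons, List.getLastD_cons]

theorem altLoop_up (p : Int) (l : List Int) :
    pilingAltLoop false p l = (if pvUp p l then "Yes" else "No") := by
  induction l generalizing p with
  | nil => simp [pilingAltLoop, pvUp]
  | cons x l ih =>
    simp only [pilingAltLoop, pvUp]
    by_cases h : x < p <;> simp [h, ih]

theorem altLoop_down (p : Int) (l : List Int) :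
    pilingAltLoop true p l = (if pvDown p l then "Yes" else "No") := by
  induction l generalizing p with
  | nil => simp [pilingAltLoop, pvDown]
  | cons x l ih =>
    simp only [pilingAltLoop, pvDown]
    by_cases h : x > p
    · simp [h, altLoop_up]
    · simp [h, ih]

-- An accepted up-phase chain is non-decreasing, so its last element dominates its first.
theorem up_le_last (p : Int) (l : List Int) (h : pvUp p l = true) :
    p ≤ (p :: l).getLastD 0 := by
  induction l generalizing p with
  | nil => simp
  | cons x l ih =>
    simp only [pvUp] at h
    by_cases hx : x < p
    · simp [hx] at h
    · rw [List.getLastD_cons, lastD_irrel (x :: l) p 0 (by simp)]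
      have := ih x (by simpa [hx] using h)
      omega

theorem up_concat_le (p y : Int) (m : List Int) (h : pvUp p (m ++ [y]) = true) :
    (p :: m).getLastD 0 ≤ y := by
  induction m generalizing p with
  | nil =>
    simp only [List.nil_append, pvUp] at h
    by_cases hy : y < p
    · simp [hy] at h
    · simpa using by omega
  | cons a m ih =>
    simp only [List.cons_append, pvUp] at h
    by_cases ha : a < p
    · simp [ha] at h
    · rw [List.getLastD_cons, lastD_irrel (a :: m) p 0 (by simp)]
      exact ih a (by simpa [ha] using h)

theorem down_concat_le (x y : Int) (m : List Int)
    (h : pvDown x (m ++ [y]) = true) (hxy : y > x) :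
    (x :: m).getLastD 0 ≤ y := by
  induction m generalizing x with
  | nil => simpa using by omega
  | cons a m ih =>
    simp only [List.cons_append, pvDown] at h
    rw [List.getLastD_cons, lastD_irrel (a :: m) x 0 (by simp)]
    by_cases ha : a > x
    · exact up_concat_le a y m (by simpa [ha] using h)
    · exact ih a (by simpa [ha] using h) (by omega)

-- Dropping a dominated last element does not change the phase verdicts.
theorem up_concat_eq (p y : Int) (m : List Int) (hle : (p :: m).getLastD 0 ≤ y) :
    pvUp p (m ++ [y]) = pvUp p m := by
  induction m generalizing p with
  | nil =>
    have hp : p ≤ y := by simpa using hle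
    simp only [List.nil_append, pvUp]
    simp [show ¬ y < p by omega]
  | cons a m ih =>
    simp only [List.cons_append, pvUp]
    by_cases ha : a < p
    · simp [ha]
    · rw [List.getLastD_cons, lastD_irrel (a :: m) p 0 (by simp)] at hle
      simp only [ha, ite_false]
      exact ih a hle

theorem down_concat_eq (x y : Int) (m : List Int) (hle : (x :: m).getLastD 0 ≤ y) :
    pvDown x (m ++ [y]) = pvDown x m := by
  induction m generalizing x with
  | nil => simp [pvDown, pvUp]
  | cons a m ih =>
    simp only [List.cons_append, pvDown]
    rw [List.getLastD_cons, lastD_irrel (a :: m) x 0 (by simp)] at hle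
    by_cases ha : a > x
    · simp only [ha, ite_true]
      exact up_concat_eq a y m hle
    · simp only [ha, ite_false]
      exact ih a hle

-- Main correspondence: A's loop computes B's valley test on any non-empty list.
theorem loop_eq : ∀ (n : Nat) (x : Int) (l : List Int), l.length ≤ n →
    pilingLoop (x :: l) = (if pvDown x l then "Yes" else "No") := by
  intro n
  induction n with
  | zero =>
    intro x l hn
    have : l = [] := List.eq_nil_of_length_eq_zero (Nat.le_zero.mp hn)
    subst this
    simp [pilingLoop, pvDown]
  | succ n ih =>
    intro x l hn
    rcases List.eq_nil_or_concat l with rfl | ⟨m, y, rfl⟩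
    · simp [pilingLoop, pvDown]
    · simp only [List.concat_eq_append] at hn ⊢
      have hlast : (x :: (m ++ [y])).getLastD 0 = y := by
        rw [show x :: (m ++ [y]) = (x :: m) ++ [y] by simp, lastD_concat]
      have hdrop : (x :: (m ++ [y])).dropLast = x :: m := by
        rw [show x :: (m ++ [y]) = (x :: m) ++ [y] by simp]
        exact List.dropLast_concat
      by_cases hyx : y > x
      · -- pop from the right
        rw [pilingLoop]
        simp only [hlast, hdrop, hyx, ite_true, List.headD_cons]
        by_cases hbad : (x :: m).getLastD 0 > y
        · have hdownf : pvDown x (m ++ [y]) = false := by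
            by_contra hc
            have := down_concat_le x y m (Bool.not_eq_false _ |>.mp hc) hyx
            omega
          rw [if_neg (show ¬ (x :: m = []) by simp), if_pos (Or.inl hbad), hdownf]
          simp
        · have heq : pvDown x (m ++ [y]) = pvDown x m := down_concat_eq x y m (by omega)
          simp only [if_neg (show ¬ (x :: m = []) by simp),
            if_neg (show ¬ ((x :: m).getLastD 0 > y ∨ x > y) by omega), heq]
          rcases m with _ | ⟨a, m'⟩
          · simp [pilingLoop, pvDown]
          · exact ih x (a :: m') (by simpa using Nat.lt_succ_iff.mp (by simpa using hn))
      · -- pop from the left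
        rw [pilingLoop]
        simp only [hlast, hyx, ite_false]
        rcases hcons : m ++ [y] with _ | ⟨h, t⟩
        · exact absurd hcons (by simp)
        · have hlastht : (h :: t).getLastD 0 = y := by
            rw [← hcons, lastD_concat]
          by_cases hh : h > x
          · -- the newly exposed left end exceeds large: both say "No"
            have hupf : pvUp h t = false := by
              by_contra hc
              have h1 := up_le_last h t (Bool.not_eq_false _ |>.mp hc)
              rw [hlastht] at h1
              omega
            have hdf : pvDown x (h :: t) = false := by simp [pvDown, hh, hupf]
            rw [if_neg (show ¬ (h :: t = []) by simp),
              if_pos (show (h :: t).getLastD 0 > x ∨ (h :: t).headD 0 > x by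
                rw [List.headD_cons]; exact Or.inr hh), hdf]
            simp
          · have hdowneq : pvDown x (h :: t) = pvDown h t := by simp [pvDown, hh]
            rw [if_neg (show ¬ (h :: t = []) by simp),
              if_neg (show ¬ ((h :: t).getLastD 0 > x ∨ (h :: t).headD 0 > x) by
                rw [hlastht, List.headD_cons]; omega), hdowneq]
            have hlen : t.length ≤ n := by
              have h1 : (m ++ [y]).length ≤ n + 1 := by simpa using hn
              rw [hcons] at h1
              simpa using Nat.lt_succ_iff.mp (by simpa using h1)
            exact ih h t hlen

-- ===== VERDICT (by name: the statement is the Claim_ definition above) =====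
theorem piling_spec : Claim_equal_piling := by
  intro blocks _ hpre
  unfold Spec_piling piling
  rcases blocks with _ | ⟨x, l⟩
  · exact absurd rfl hpre
  · show pilingLoop (x :: l) = pilingAltLoop true x l
    rw [loop_eq l.length x l le_rfl, altLoop_down]
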